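-- pv_equiv track=rewrite | github.com/MrSkl1f/CG | 2lab/2lab.py | findUppers
-- ===== SOURCE A (Python) =====
-- def findUppers(xCircle, yCircle):
--     upX = xCircle[0]
--     upY = yCircle[0]
--     loX = xCircle[0]
--     loY = yCircle[0]
--     for i in range(len(xCircle)):
--         if xCircle[i] > upX:
--             upX = xCircle[i]
--         if xCircle[i] < loX:
--             loX = xCircle[i]
--         if yCircle[i] > upY:
--             upY = yCircle[i]
--         if yCircle[i] < loY:
--             loY = yCircle[i]
--     return upX, upY, loX, loY
-- ===== SOURCE B (Python) =====
-- def findUppers(xCircle, yCircle):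
--     # A only reads the first len(xCircle) entries of yCircle
--     ys = yCircle[:len(xCircle)]
--     return max(xCircle), max(ys), min(xCircle), min(ys)
-- ===== Notes on version B (the rewrite author's own statement) =====
-- stated objective: idiomatic
-- what changed: The fused index loop with four conditionally-updated accumulators is replaced by four builtin max/min reductions over xCircle and over the prefix of yCircle that A actually reads.
import Mathlib
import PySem

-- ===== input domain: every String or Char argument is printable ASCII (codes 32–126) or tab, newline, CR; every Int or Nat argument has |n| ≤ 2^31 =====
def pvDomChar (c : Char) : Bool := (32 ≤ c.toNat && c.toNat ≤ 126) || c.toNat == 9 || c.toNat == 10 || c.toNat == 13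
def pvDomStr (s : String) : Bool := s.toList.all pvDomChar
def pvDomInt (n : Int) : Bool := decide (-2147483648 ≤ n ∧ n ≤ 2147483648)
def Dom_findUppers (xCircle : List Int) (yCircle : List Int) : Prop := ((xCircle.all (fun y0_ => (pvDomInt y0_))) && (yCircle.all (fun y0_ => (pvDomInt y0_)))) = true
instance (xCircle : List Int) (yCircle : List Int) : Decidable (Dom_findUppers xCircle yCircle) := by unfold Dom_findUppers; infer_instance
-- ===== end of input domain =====

-- B replaces A's fused index loop with four builtin max/min reductions (over xCircle and
-- the prefix of yCircle that A reads); objective: idiomatic, same O(n) cost.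


-- ===== PORT A =====
-- literal port: seed the four accumulators with xCircle[0]/yCircle[0], then the index loop
-- (indexing via pyGetD; the default is never read inside Pre_, which rules out the IndexError inputs)
def findUppers (xCircle : List Int) (yCircle : List Int) : Int × Int × Int × Int :=
  let upX := PySem.List.pyGetD xCircle 0 0
  let upY := PySem.List.pyGetD yCircle 0 0
  let loX := PySem.List.pyGetD xCircle 0 0
  let loY := PySem.List.pyGetD yCircle 0 0
  (PySem.List.pyRange 0 (PySem.List.len xCircle) 1).foldl
    (fun (s : Int × Int × Int × Int) i =>
      let xi := PySem.List.pyGetD xCircle i 0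
      let yi := PySem.List.pyGetD yCircle i 0
      (if xi > s.1 then xi else s.1,
       if yi > s.2.1 then yi else s.2.1,
       if xi < s.2.2.1 then xi else s.2.2.1,
       if yi < s.2.2.2 then yi else s.2.2.2))
    (upX, upY, loX, loY)

-- ===== PORT B =====
def findUppers_alt (xCircle : List Int) (yCircle : List Int) : Int × Int × Int × Int :=
  let ys := PySem.List.slice yCircle none (some (PySem.List.len xCircle))
  ((PySem.List.max? xCircle (fun v => v)).getD 0,
   (PySem.List.max? ys (fun v => v)).getD 0,
   (PySem.List.min? xCircle (fun v => v)).getD 0,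
   (PySem.List.min? ys (fun v => v)).getD 0)

-- ===== PRECONDITION & SPEC =====
-- Pre_ excludes exactly the inputs where A raises IndexError: empty xCircle (xCircle[0]),
-- empty yCircle (yCircle[0]), or yCircle shorter than xCircle (yCircle[i] inside the loop).
def Pre_findUppers (xCircle : List Int) (yCircle : List Int) : Prop :=
  xCircle ≠ [] ∧ xCircle.length ≤ yCircle.length
instance (xCircle : List Int) (yCircle : List Int) : Decidable (Pre_findUppers xCircle yCircle) := by unfold Pre_findUppers; infer_instance
def pvWitness_findUppers : List Int × List Int := ([3, -1, 4], [1, 5, 9])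

def Spec_findUppers (xCircle : List Int) (yCircle : List Int) (out : Int × Int × Int × Int) : Prop := out = findUppers_alt xCircle yCircle
instance (xCircle : List Int) (yCircle : List Int) (out : Int × Int × Int × Int) : Decidable (Spec_findUppers xCircle yCircle out) := by unfold Spec_findUppers; infer_instance

-- ===== CLAIM (what is proved, stated in full; the proofs are below) =====
def Claim_equal_findUppers : Prop := ∀ (xCircle : List Int) (yCircle : List Int), Dom_findUppers xCircle yCircle → Pre_findUppers xCircle yCircle → Spec_findUppers xCircle yCircle (findUppers xCircle yCircle)

-- ===== LEMMAS AND PROOFS =====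

theorem if_gt_eq_max (u v : Int) : (if v > u then v else u) = max u v := by
  split_ifs <;> omega

theorem if_lt_eq_min (u v : Int) : (if v < u then v else u) = min u v := by
  split_ifs <;> omega

-- the index loop over two lists is the fold over their zip
theorem fold_idx_zip :
    ∀ (x y : List Int), x.length ≤ y.length → ∀ (s : Int × Int × Int × Int),
    (List.range x.length).foldl
      (fun (s : Int × Int × Int × Int) i =>
        (if x.getD i 0 > s.1 then x.getD i 0 else s.1,
         if y.getD i 0 > s.2.1 then y.getD i 0 else s.2.1,
         if x.getD i 0 < s.2.2.1 then x.getD i 0 else s.2.2.1,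
         if y.getD i 0 < s.2.2.2 then y.getD i 0 else s.2.2.2)) s
      = (x.zip y).foldl
          (fun (s : Int × Int × Int × Int) p =>
            (if p.1 > s.1 then p.1 else s.1,
             if p.2 > s.2.1 then p.2 else s.2.1,
             if p.1 < s.2.2.1 then p.1 else s.2.2.1,
             if p.2 < s.2.2.2 then p.2 else s.2.2.2)) s := by
  intro x
  induction x with
  | nil => intro y _ s; simp
  | cons a t ih =>
    intro y hy s
    cases y with
    | nil => simp at hy
    | cons b u =>
      simp only [List.length_cons, List.range_succ_eq_map, List.foldl_cons, List.foldl_map,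
        List.getD_cons_zero, List.getD_cons_succ, List.zip_cons_cons]
      exact ih u (by simpa using hy) _

-- zipping with a list truncated to the left length changes nothing
theorem zip_take_len {α β : Type} : ∀ (l : List α) (l' : List β),
    l.zip (l'.take l.length) = l.zip l' := by
  intro l
  induction l with
  | nil => intro l'; simp
  | cons a t ih =>
    intro l'
    cases l' with
    | nil => simp
    | cons b u => simp [ih u]

-- the quadruple fold splits into four componentwise max/min folds
theorem zip_fold_quad : ∀ (l : List (Int × Int)) (a b c d : Int),
    l.foldl
      (fun (s : Int × Int × Int × Int) p =>
        (max s.1 p.1, max s.2.1 p.2, min s.2.2.1 p.1, min s.2.2.2 p.2)) (a, b, c, d)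
      = ((l.map Prod.fst).foldl max a, (l.map Prod.snd).foldl max b,
         (l.map Prod.fst).foldl min c, (l.map Prod.snd).foldl min d) := by
  intro l
  induction l with
  | nil => intro a b c d; simp
  | cons p t ih =>
    intro a b c d
    simp only [List.foldl_cons, List.map_cons]
    exact ih _ _ _ _

-- ===== VERDICT (by name: the statement is the Claim_ definition above) =====
theorem findUppers_spec : Claim_equal_findUppers := by
  intro x y _ hpre
  obtain ⟨hne, hlen⟩ := hpre
  unfold Spec_findUppers findUppers findUppers_alt
  obtain ⟨a, t, rfl⟩ := List.exists_cons_of_ne_nil hne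
  cases y with
  | nil => simp at hlen
  | cons b u =>
    have hseedx : PySem.List.pyGetD (a :: t) (0 : Int) (0 : Int) = a := by simp [pysem]
    have hseedy : PySem.List.pyGetD (b :: u) (0 : Int) (0 : Int) = b := by simp [pysem]
    have hlen'' : ((b :: u).take (a :: t).length).length ≤ (a :: t).length := by simp
    simp only [PySem.List.len, PySem.List.pyRange_zero_natCast, List.foldl_map,
      PySem.List.pyGetD_natCast, PySem.List.slice_to_natCast, hseedx, hseedy]
    rw [fold_idx_zip _ _ hlen]
    have hfun : (fun (s : Int × Int × Int × Int) (p : Int × Int) =>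
        (if p.1 > s.1 then p.1 else s.1,
         if p.2 > s.2.1 then p.2 else s.2.1,
         if p.1 < s.2.2.1 then p.1 else s.2.2.1,
         if p.2 < s.2.2.2 then p.2 else s.2.2.2))
        = (fun (s : Int × Int × Int × Int) (p : Int × Int) =>
            (max s.1 p.1, max s.2.1 p.2, min s.2.2.1 p.1, min s.2.2.2 p.2)) := by
      funext s p
      simp [if_gt_eq_max, if_lt_eq_min]
    rw [hfun, zip_fold_quad, List.map_fst_zip hlen,
      ← zip_take_len (a :: t) (b :: u), List.map_snd_zip hlen'']
    have hysne : (b :: u).take (a :: t).length = b :: u.take t.length := by simp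
    rw [hysne, PySem.List.max?_id_cons, PySem.List.min?_id_cons,
      PySem.List.max?_id_cons, PySem.List.min?_id_cons]
    simp [List.foldl_cons, max_self, min_self]
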